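-- pv_equiv track=rewrite | github.com/kino-6/SpecDiff | projects/sample_pj/scripts/make_report.py | _sanitize_anchor
-- ===== SOURCE A (Python) =====
-- def _sanitize_anchor(value: str) -> str:
--     slug = []
--     last_hyphen = False
--     for char in value.lower():
--         if char.isalnum():
--             slug.append(char)
--             last_hyphen = False
--         else:
--             if not last_hyphen:
--                 slug.append("-")
--                 last_hyphen = True
--     cleaned = "".join(slug).strip("-")
--     return cleaned or "feature"
-- ===== SOURCE B (Python) =====
-- def _sanitize_anchor(value: str) -> str:
--     tokens = "".join(c if c.isalnum() else " " for c in value.lower()).split()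
--     return "-".join(tokens) or "feature"
-- ===== Notes on version B (the rewrite author's own statement) =====
-- stated objective: idiomatic
-- what changed: Replaces A's stateful per-character loop with a last_hyphen flag plus a final two-sided hyphen strip by the idiomatic map-split-join pipeline: non-alnum chars become spaces, str.split() collapses and trims separator runs, and the tokens are hyphen-joined.
import Mathlib
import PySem

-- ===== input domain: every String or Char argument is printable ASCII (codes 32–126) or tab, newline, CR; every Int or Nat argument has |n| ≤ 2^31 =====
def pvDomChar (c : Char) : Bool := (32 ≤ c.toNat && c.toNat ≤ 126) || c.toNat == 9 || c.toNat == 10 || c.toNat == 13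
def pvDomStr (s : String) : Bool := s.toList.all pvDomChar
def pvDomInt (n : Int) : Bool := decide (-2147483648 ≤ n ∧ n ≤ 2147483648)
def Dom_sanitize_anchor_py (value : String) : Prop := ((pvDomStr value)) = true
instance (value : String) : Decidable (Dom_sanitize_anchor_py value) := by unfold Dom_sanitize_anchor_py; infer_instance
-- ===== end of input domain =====

-- B replaces A's per-character hyphen flag and final strip('-') by mapping separators to spaces,
-- splitting into tokens and joining with '-' (objective: idiomatic; same behaviour, same O(n) cost).

-- ===== PORT A =====
-- the body of A's for-loop over (slug, last_hyphen)
def stepA (st : List Char × Bool) (c : Char) : List Char × Bool :=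
  if PySem.Chars.isalnum c then (st.1 ++ [c], false)
  else if !st.2 then (st.1 ++ ['-'], true) else st

def sanitize_anchor_py (value : String) : String :=
  let r := (PySem.Str.lower value).toList.foldl stepA ([], false)
  let cleaned := PySem.Str.stripChars (String.ofList r.1) "-"   -- "".join(slug).strip("-")
  if cleaned = "" then "feature" else cleaned                   -- cleaned or "feature"

-- ===== PORT B =====
def sanitize_anchor_py_alt (value : String) : String :=
  let mapped := String.ofList ((PySem.Str.lower value).toList.map
    (fun c => if PySem.Chars.isalnum c then c else ' '))        -- "".join(c if c.isalnum() else " " …)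
  let joined := PySem.Str.join "-" (PySem.Str.split₀ mapped)    -- "-".join(….split())
  if joined = "" then "feature" else joined                     -- … or "feature"

-- ===== PRECONDITION & SPEC =====
def Spec_sanitize_anchor_py (value : String) (out : String) : Prop := out = sanitize_anchor_py_alt value
instance (value : String) (out : String) : Decidable (Spec_sanitize_anchor_py value out) := by unfold Spec_sanitize_anchor_py; infer_instance

-- ===== CLAIM (what is proved, stated in full; the proofs are below) =====
def Claim_equal_sanitize_anchor_py : Prop := ∀ (value : String), Dom_sanitize_anchor_py value → Spec_sanitize_anchor_py value (sanitize_anchor_py value)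

-- ===== LEMMAS AND PROOFS =====

-- character facts
theorem alnum_range (c : Char) (h : PySem.Chars.isalnum c = true) :
    (48 ≤ c.toNat ∧ c.toNat ≤ 57) ∨ (65 ≤ c.toNat ∧ c.toNat ≤ 90) ∨ (97 ≤ c.toNat ∧ c.toNat ≤ 122) := by
  simp only [PySem.Chars.isalnum, PySem.Chars.isalpha, PySem.Chars.isdigit, PySem.Chars.isupper,
    PySem.Chars.islower, Bool.or_eq_true, Bool.and_eq_true, decide_eq_true_eq, Char.le_def,
    UInt32.le_iff_toNat_le] at h
  have e1 : 'A'.val.toNat = 65 := rfl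
  have e2 : 'Z'.val.toNat = 90 := rfl
  have e3 : 'a'.val.toNat = 97 := rfl
  have e4 : 'z'.val.toNat = 122 := rfl
  have e5 : '0'.val.toNat = 48 := rfl
  have e6 : '9'.val.toNat = 57 := rfl
  unfold Char.toNat
  omega

theorem alnum_not_space (c : Char) (h : PySem.Chars.isalnum c = true) : PySem.Chars.isspace c = false := by
  have h2 := alnum_range c h
  simp only [PySem.Chars.isspace, Bool.or_eq_false_iff, Bool.and_eq_false_iff, decide_eq_false_iff_not]
  omega

theorem alnum_ne_dash (c : Char) (h : PySem.Chars.isalnum c = true) : c ≠ '-' := by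
  rintro rfl; revert h; decide

-- A's loop as a head recursion
def slugA : List Char → Bool → List Char
  | [], _ => []
  | c :: cs, h =>
    if PySem.Chars.isalnum c then c :: slugA cs false
    else if h then slugA cs true else '-' :: slugA cs true

theorem foldl_stepA (cs : List Char) : ∀ (pre : List Char) (h : Bool),
    (cs.foldl stepA (pre, h)).1 = pre ++ slugA cs h := by
  induction cs with
  | nil => intro pre h; simp [slugA]
  | cons c cs ih =>
    intro pre h
    by_cases hc : PySem.Chars.isalnum c = true
    · simp [stepA, slugA, hc, ih]
    · cases h <;> simp [stepA, slugA, hc, ih]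

-- strip('-') on the list side
def rstripD (xs : List Char) : List Char := (xs.reverse.dropWhile (fun c => c == '-')).reverse

theorem stripChars_dash (xs : List Char) :
    PySem.Chars.stripChars xs ['-'] = rstripD (xs.dropWhile (fun c => c == '-')) := by
  have hp : (fun c => (['-'] : List Char).contains c) = (fun c : Char => c == '-') := by
    funext c
    cases h : c == '-' <;> simp_all
  show (List.dropWhile (fun c => (['-'] : List Char).contains c)
      (List.dropWhile (fun c => (['-'] : List Char).contains c) xs).reverse).reverse = _
  rw [hp]; rfl

theorem rstripD_cons_of_ne (c : Char) (xs : List Char) (h : c ≠ '-') :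
    rstripD (c :: xs) = c :: rstripD xs := by
  have hb : (c == '-') = false := by simpa using h
  simp only [rstripD, List.reverse_cons, List.dropWhile_append]
  by_cases he : (xs.reverse.dropWhile (fun c => c == '-')).isEmpty = true
  · simp [List.isEmpty_iff.mp he, List.dropWhile_cons, hb]
  · simp [he]

theorem rstripD_dash_cons (xs : List Char) :
    rstripD ('-' :: xs) = if rstripD xs = [] then [] else '-' :: rstripD xs := by
  simp only [rstripD, List.reverse_cons, List.dropWhile_append]
  by_cases he : (xs.reverse.dropWhile (fun c => c == '-')).isEmpty = true
  · simp [List.isEmpty_iff.mp he, List.dropWhile_cons]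
  · have hne : xs.reverse.dropWhile (fun c => c == '-') ≠ [] := by
      simpa [List.isEmpty_iff] using he
    simp [he, hne]

-- slugA with flag true never starts with '-'
theorem slugA_true_head (cs : List Char) :
    (slugA cs true).dropWhile (fun c => c == '-') = slugA cs true := by
  induction cs with
  | nil => simp [slugA]
  | cons c cs ih =>
    by_cases hc : PySem.Chars.isalnum c = true
    · have hb : (c == '-') = false := by simpa using alnum_ne_dash c hc
      simp [slugA, hc, List.dropWhile_cons, hb]
    · simp [slugA, hc, ih]

theorem slugA_false_strip (cs : List Char) :
    (slugA cs false).dropWhile (fun c => c == '-') = slugA cs true := by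
  cases cs with
  | nil => simp [slugA]
  | cons c cs =>
    by_cases hc : PySem.Chars.isalnum c = true
    · have hb : (c == '-') = false := by simpa using alnum_ne_dash c hc
      simp [slugA, hc, List.dropWhile_cons, hb]
    · simpa [slugA, hc, List.dropWhile_cons] using slugA_true_head cs

-- intercalate on two or more parts
theorem intercalate_cons₂ (s a b : List Char) (l : List (List Char)) :
    List.intercalate s (a :: b :: l) = a ++ s ++ List.intercalate s (b :: l) := by
  simp [List.intercalate]

-- split₀.go facts
theorem go_acc (ws : List Char) : ∀ (cur : List Char) (acc : List (List Char)),
    PySem.Chars.split₀.go ws cur acc = acc.reverse ++ PySem.Chars.split₀.go ws cur [] := by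
  induction ws with
  | nil =>
    intro cur acc
    by_cases hc : cur.isEmpty = true <;> simp [PySem.Chars.split₀.go, hc]
  | cons c ws ih =>
    intro cur acc
    rw [PySem.Chars.split₀.go, PySem.Chars.split₀.go]
    by_cases hs : PySem.Chars.isspace c = true
    · by_cases hc : cur.isEmpty = true
      · simp only [hs, hc, if_true]
        exact ih [] acc
      · simp only [hs, hc, if_true, Bool.false_eq_true, if_false]
        rw [ih [] (cur.reverse :: acc), ih [] [cur.reverse]]
        simp
    · simp only [hs, Bool.false_eq_true, if_false]
      exact ih (c :: cur) acc

theorem go_no_nil (ws : List Char) : ∀ (cur : List Char) (acc : List (List Char)),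
    (∀ w ∈ acc, w ≠ []) → ∀ w ∈ PySem.Chars.split₀.go ws cur acc, w ≠ [] := by
  induction ws with
  | nil =>
    intro cur acc hacc w hw
    by_cases hc : cur.isEmpty = true
    · simp [PySem.Chars.split₀.go, hc] at hw
      exact hacc w hw
    · simp [PySem.Chars.split₀.go, hc] at hw
      rcases hw with hw | hw
      · exact hacc w hw
      · subst hw
        simpa [List.isEmpty_iff] using hc
  | cons c ws ih =>
    intro cur acc hacc w hw
    rw [PySem.Chars.split₀.go] at hw
    by_cases hs : PySem.Chars.isspace c = true
    · by_cases hc : cur.isEmpty = true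
      · simp only [hs, hc, if_true] at hw
        exact ih [] acc hacc w hw
      · simp only [hs, hc, if_true, Bool.false_eq_true, if_false] at hw
        refine ih [] (cur.reverse :: acc) ?_ w hw
        intro v hv
        rcases List.mem_cons.mp hv with rfl | hv
        · simpa [List.isEmpty_iff] using hc
        · exact hacc v hv
    · simp only [hs, Bool.false_eq_true, if_false] at hw
      exact ih (c :: cur) acc hacc w hw

theorem intercalate_eq_nil_of_no_nil (ws : List (List Char)) (h : ∀ w ∈ ws, w ≠ [])
    (he : List.intercalate ['-'] ws = []) : ws = [] := by
  cases ws with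
  | nil => rfl
  | cons w ws =>
    exfalso
    cases ws with
    | nil => exact h w (by simp) (by simpa [List.intercalate] using he)
    | cons v vs =>
      rw [intercalate_cons₂] at he
      exact h w (by simp) (by simpa using (List.append_eq_nil_iff.mp he).1)

-- the mapped character list of B
def replC (c : Char) : Char := if PySem.Chars.isalnum c then c else ' '

-- main correspondence between B's split-and-join and A's slug
theorem main_go (cs : List Char) :
    (List.intercalate ['-'] (PySem.Chars.split₀.go (cs.map replC) [] []) = rstripD (slugA cs true))
    ∧ (∀ cur : List Char, cur ≠ [] →
        List.intercalate ['-'] (PySem.Chars.split₀.go (cs.map replC) cur []) =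
          cur.reverse ++ rstripD (slugA cs false)) := by
  induction cs with
  | nil =>
    constructor
    · simp [PySem.Chars.split₀.go, slugA, rstripD, List.intercalate]
    · intro cur hcur
      have hce : cur.isEmpty = false := by simpa [List.isEmpty_iff] using hcur
      simp [PySem.Chars.split₀.go, slugA, rstripD, hce, List.intercalate]
  | cons c cs ih =>
    by_cases hc : PySem.Chars.isalnum c = true
    · have hsp : PySem.Chars.isspace c = false := alnum_not_space c hc
      have hd : c ≠ '-' := alnum_ne_dash c hc
      have hmap : (c :: cs).map replC = c :: cs.map replC := by simp [replC, hc]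
      constructor
      · rw [hmap, PySem.Chars.split₀.go]
        simp only [hsp, Bool.false_eq_true, if_false]
        rw [(ih.2) [c] (by simp)]
        simp [slugA, hc, rstripD_cons_of_ne c _ hd]
      · intro cur hcur
        rw [hmap, PySem.Chars.split₀.go]
        have hce : cur.isEmpty = false := by simpa [List.isEmpty_iff] using hcur
        simp only [hsp, Bool.false_eq_true, if_false]
        rw [(ih.2) (c :: cur) (by simp)]
        simp [slugA, hc, rstripD_cons_of_ne c _ hd]
    · have hmap : (c :: cs).map replC = ' ' :: cs.map replC := by simp [replC, hc]
      have hsp : PySem.Chars.isspace ' ' = true := by decide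
      constructor
      · rw [hmap, PySem.Chars.split₀.go]
        simp only [hsp, if_true, List.isEmpty_nil]
        rw [ih.1]
        simp [slugA, hc]
      · intro cur hcur
        rw [hmap, PySem.Chars.split₀.go]
        have hce : cur.isEmpty = false := by simpa [List.isEmpty_iff] using hcur
        simp only [hsp, hce, if_true, Bool.false_eq_true, if_false]
        rw [go_acc]
        have hslug : slugA (c :: cs) false = '-' :: slugA cs true := by simp [slugA, hc]
        rw [hslug, rstripD_dash_cons]
        by_cases hnil : rstripD (slugA cs true) = []
        · have hws : PySem.Chars.split₀.go (cs.map replC) [] [] = [] := by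
            apply intercalate_eq_nil_of_no_nil _ (go_no_nil _ _ _ (by simp))
            rw [ih.1]; exact hnil
          simp [hws, hnil, List.intercalate]
        · have hws : PySem.Chars.split₀.go (cs.map replC) [] [] ≠ [] := by
            intro hcon
            exact hnil (by rw [← ih.1, hcon]; simp [List.intercalate])
          rcases List.exists_cons_of_ne_nil hws with ⟨w, ws', hws'⟩
          rw [if_neg hnil, hws', List.reverse_cons, List.reverse_nil, List.nil_append,
            List.singleton_append, intercalate_cons₂, ← hws', ih.1]
          simp

theorem main_chars (cs : List Char) :
    PySem.Chars.stripChars (slugA cs false) ['-'] =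
      List.intercalate ['-'] (PySem.Chars.split₀ (cs.map replC)) := by
  rw [stripChars_dash, slugA_false_strip, PySem.Chars.split₀, (main_go cs).1]

-- ===== VERDICT (by name: the statement is the Claim_ definition above) =====
theorem sanitize_anchor_py_spec : Claim_equal_sanitize_anchor_py := by
  unfold Claim_equal_sanitize_anchor_py
  intro value _
  simp only [Spec_sanitize_anchor_py, sanitize_anchor_py, sanitize_anchor_py_alt]
  set cs := (PySem.Str.lower value).toList with hcs
  have hA : PySem.Str.stripChars (String.ofList (cs.foldl stepA ([], false)).1) "-" =
      String.ofList (PySem.Chars.stripChars (slugA cs false) ['-']) := by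
    rw [foldl_stepA cs [] false, List.nil_append]
    show String.ofList (PySem.Chars.stripChars (String.ofList (slugA cs false)).toList ("-").toList) = _
    simp
  have hB : PySem.Str.join "-" (PySem.Str.split₀ (String.ofList (cs.map
        (fun c => if PySem.Chars.isalnum c then c else ' ')))) =
      String.ofList (List.intercalate ['-'] (PySem.Chars.split₀ (cs.map replC))) := by
    have hre : (fun c => if PySem.Chars.isalnum c = true then c else ' ') = replC := by
      funext c; simp [replC]
    simp [PySem.Str.join, PySem.Str.split₀, PySem.Chars.join, hre, List.map_map, Function.comp_def]
  rw [hA, hB, main_chars cs]
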